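-- pv_equiv track=rewrite | github.com/Mike-Web-Dev-Ing/newsletterepicerie | scripts/export_docs.py | paginate_lines
-- ===== SOURCE A (Python) =====
-- def paginate_lines(lines):
--     pages = []
--     current = []
--     max_lines = 48
--     count = 0
--     for text, kind in lines:
--         if kind == "pagebreak":
--             pages.append(current)
--             current = []
--             count = 0
--             continue
--         if count >= max_lines:
--             pages.append(current)
--             current = []
--             count = 0
--         current.append((text, kind))
--         if kind not in {"spacer"}:
--             count += 1
--     if current:
--         pages.append(current)
--     return pages
-- ===== SOURCE B (Python) =====
-- def _take_page(seg):
--     # take lines through the 48th non-spacer line; return (page, remainder)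
--     n = 0
--     for i, (text, kind) in enumerate(seg):
--         if kind != "spacer":
--             n += 1
--             if n == 48:
--                 return seg[: i + 1], seg[i + 1 :]
--     return list(seg), []
--
--
-- def _chunk(seg):
--     pages = []
--     while seg:
--         page, seg = _take_page(seg)
--         pages.append(page)
--     return pages
--
--
-- def paginate_lines(lines):
--     # split at "pagebreak" markers (marker ends a segment and is discarded)
--     segments = []
--     seg = []
--     for text, kind in lines:
--         if kind == "pagebreak":
--             segments.append(seg)
--             seg = []
--         else:
--             seg.append((text, kind))
--     pages = []
--     for s in segments:
--         pages.extend(_chunk(s) or [[]])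
--     if seg:
--         pages.extend(_chunk(seg))
--     return pages
-- ===== Notes on version B (the rewrite author's own statement) =====
-- stated objective: alternative
-- what changed: Replaces A's single stateful loop (pages/current/count juggled together) by a two-phase decomposition: first split the lines into segments at each 'pagebreak' marker, then chunk every segment into pages by repeatedly cutting at the 48th non-spacer line (a non-final empty segment emits one empty page).
import Mathlib
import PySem

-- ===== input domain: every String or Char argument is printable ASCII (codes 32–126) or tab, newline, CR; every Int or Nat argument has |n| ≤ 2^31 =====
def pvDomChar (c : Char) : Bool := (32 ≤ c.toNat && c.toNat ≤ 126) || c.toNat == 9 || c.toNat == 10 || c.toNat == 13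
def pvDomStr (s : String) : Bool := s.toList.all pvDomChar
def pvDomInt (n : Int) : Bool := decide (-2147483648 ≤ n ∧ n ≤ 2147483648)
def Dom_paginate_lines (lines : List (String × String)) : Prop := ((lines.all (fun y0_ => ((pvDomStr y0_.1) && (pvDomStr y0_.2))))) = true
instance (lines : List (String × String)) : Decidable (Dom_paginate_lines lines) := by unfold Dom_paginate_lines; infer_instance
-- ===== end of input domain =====

-- B replaces A's single stateful loop by split-at-pagebreaks then chunk-each-segment; same cost, different decomposition.

-- ===== PORT A =====
-- the for-loop of A, with its state (pages, current, count); trailing 'if current: pages.append(current)' at []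
def pagLoop : List (String × String) → List (List (String × String)) → List (String × String) → Nat → List (List (String × String))
  | [], pages, current, _ => if current ≠ [] then pages ++ [current] else pages
  | (t, k) :: rest, pages, current, count =>
    if k = "pagebreak" then
      pagLoop rest (pages ++ [current]) [] 0
    else if 48 ≤ count then
      pagLoop rest (pages ++ [current]) [(t, k)] (if k ≠ "spacer" then 1 else 0)
    else
      pagLoop rest pages (current ++ [(t, k)]) (count + if k ≠ "spacer" then 1 else 0)

def paginate_lines (lines : List (String × String)) : List (List (String × String)) :=
  pagLoop lines [] [] 0

-- ===== PORT B =====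
-- _take_page: take lines through the 48th non-spacer line; return (page, remainder)
def takePage : List (String × String) → Nat → List (String × String) × List (String × String)
  | [], _ => ([], [])
  | (t, k) :: rest, n =>
    if k ≠ "spacer" then
      if n + 1 = 48 then ([(t, k)], rest)
      else
        let pr := takePage rest (n + 1)
        ((t, k) :: pr.1, pr.2)
    else
      let pr := takePage rest n
      ((t, k) :: pr.1, pr.2)

-- termination helper for chunk: the remainder strictly shrinks
theorem takePage_snd_len : ∀ (seg : List (String × String)) (n : Nat),
    (takePage seg n).2.length ≤ seg.length := by
  intro seg
  induction seg with
  | nil => intro n; simp [takePage]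
  | cons x rest ih =>
    intro n
    obtain ⟨t, k⟩ := x
    simp only [takePage]
    split
    · split
      · simp
      · simpa using Nat.le_succ_of_le (ih (n + 1))
    · simpa using Nat.le_succ_of_le (ih n)

-- _chunk: repeatedly cut a page off the segment
def chunk : List (String × String) → List (List (String × String))
  | [] => []
  | x :: rest =>
    let pr := takePage (x :: rest) 0
    pr.1 :: chunk pr.2
termination_by seg => seg.length
decreasing_by
  have h := takePage_snd_len rest (if x.2 ≠ "spacer" then 0 + 1 else 0)
  obtain ⟨t, k⟩ := x
  simp only [takePage]
  split
  · split
    · simp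
    · simpa using Nat.lt_succ_of_le (takePage_snd_len rest (0 + 1))
  · simpa using Nat.lt_succ_of_le (takePage_snd_len rest 0)

-- the first for-loop of B: split at "pagebreak" markers, accumulating (segments, seg)
def splitSegs : List (String × String) → List (List (String × String)) → List (String × String) → List (List (String × String)) × List (String × String)
  | [], segs, seg => (segs, seg)
  | (t, k) :: rest, segs, seg =>
    if k = "pagebreak" then splitSegs rest (segs ++ [seg]) []
    else splitSegs rest segs (seg ++ [(t, k)])

def paginate_lines_alt (lines : List (String × String)) : List (List (String × String)) :=
  let sp := splitSegs lines [] []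
  (sp.1.flatMap (fun s => let c := chunk s; if c = [] then [[]] else c))
    ++ (if sp.2 ≠ [] then chunk sp.2 else [])

-- ===== PRECONDITION & SPEC =====
def Spec_paginate_lines (lines : List (String × String)) (out : List (List (String × String))) : Prop := out = paginate_lines_alt lines
instance (lines : List (String × String)) (out : List (List (String × String))) : Decidable (Spec_paginate_lines lines out) := by unfold Spec_paginate_lines; infer_instance

-- ===== CLAIM (what is proved, stated in full; the proofs are below) =====
def Claim_equal_paginate_lines : Prop := ∀ (lines : List (String × String)), Dom_paginate_lines lines → Spec_paginate_lines lines (paginate_lines lines)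

-- ===== LEMMAS AND PROOFS =====

-- number of non-spacer lines
def ns : List (String × String) → Nat
  | [] => 0
  | (_, k) :: r => (if k ≠ "spacer" then 1 else 0) + ns r

-- the last element exists and is a non-spacer
def lastNS : List (String × String) → Prop
  | [] => False
  | [(_, k)] => k ≠ "spacer"
  | _ :: y :: r => lastNS (y :: r)

theorem lastNS_cons_cons (x y : String × String) (r : List (String × String)) :
    lastNS (x :: y :: r) = lastNS (y :: r) := rfl

theorem ns_pos_of_lastNS : ∀ (l : List (String × String)), lastNS l → 0 < ns l := by
  intro l
  induction l with
  | nil => intro h; exact absurd h (by simp [lastNS])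
  | cons x r ih =>
    intro h
    obtain ⟨t, k⟩ := x
    cases r with
    | nil =>
      simp only [lastNS] at h
      simp [ns, h]
    | cons y rr =>
      rw [lastNS_cons_cons] at h
      have h2 := ih h
      obtain ⟨ty, ky⟩ := y
      have he : ns ((t, k) :: (ty, ky) :: rr) = (if k ≠ "spacer" then 1 else 0) + ns ((ty, ky) :: rr) := rfl
      rw [he]
      split <;> omega

-- T1: if fewer than 48 non-spacers remain possible, takePage consumes everything
theorem takePage_all : ∀ (seg : List (String × String)) (n : Nat),
    n + ns seg < 48 → takePage seg n = (seg, []) := by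
  intro seg
  induction seg with
  | nil => intro n _; simp [takePage]
  | cons x rest ih =>
    intro n h
    obtain ⟨t, k⟩ := x
    simp only [ns] at h
    simp only [takePage]
    split
    · rename_i hk
      rw [if_pos hk] at h
      have hne : ¬ (n + 1 = 48) := by omega
      rw [if_neg hne, ih (n + 1) (by omega)]
    · rename_i hk
      rw [if_neg hk] at h
      rw [ih n (by omega)]

-- T2: a block holding exactly the 48th non-spacer at its end is cut off exactly
theorem takePage_cut : ∀ (seg tail : List (String × String)) (n : Nat),
    n + ns seg = 48 → lastNS seg → takePage (seg ++ tail) n = (seg, tail) := by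
  intro seg
  induction seg with
  | nil => intro tail n h hl; exact absurd hl (by simp [lastNS])
  | cons x rest ih =>
    intro tail n h hl
    obtain ⟨t, k⟩ := x
    simp only [ns] at h
    simp only [List.cons_append, takePage]
    split
    · rename_i hk
      rw [if_pos hk] at h
      by_cases h48 : n + 1 = 48
      · rw [if_pos h48]
        have hr0 : ns rest = 0 := by omega
        have hrest : rest = [] := by
          cases rest with
          | nil => rfl
          | cons y rr =>
            rw [lastNS_cons_cons] at hl
            exact absurd (ns_pos_of_lastNS _ hl) (by omega)
        subst hrest; simp
      · rw [if_neg h48]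
        have hrest : rest ≠ [] := by
          intro he; subst he
          simp [ns] at h; omega
        have hl' : lastNS rest := by
          cases rest with
          | nil => exact absurd rfl hrest
          | cons y rr => rw [lastNS_cons_cons] at hl; exact hl
        rw [ih tail (n + 1) (by omega) hl']
    · rename_i hk
      rw [if_neg hk] at h
      have hrest : rest ≠ [] := by
        intro he; subst he
        have hl1 : k ≠ "spacer" := by simpa [lastNS] using hl
        exact absurd (not_not.mp hk) hl1
      have hl' : lastNS rest := by
        cases rest with
        | nil => exact absurd rfl hrest
        | cons y rr => rw [lastNS_cons_cons] at hl; exact hl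
      rw [ih tail n (by omega) hl']

-- a "partial current page": what A's invariant guarantees about `current`
def PageInv (current : List (String × String)) (count : Nat) : Prop :=
  count = ns current ∧ count ≤ 48 ∧ (count = 48 → lastNS current)

-- chunk of a valid partial page is that single page
theorem chunk_inv (current : List (String × String)) (count : Nat)
    (hi : PageInv current count) (hne : current ≠ []) : chunk current = [current] := by
  obtain ⟨h1, h2, h3⟩ := hi
  have htp : takePage current 0 = (current, []) := by
    by_cases h48 : count = 48
    · have := takePage_cut current [] 0 (by omega) (h3 h48)
      simpa using this
    · exact takePage_all current 0 (by omega)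
  cases current with
  | nil => exact absurd rfl hne
  | cons x r =>
    rw [chunk, htp]
    simp [chunk]

-- chunk of a full page (48 non-spacers, ending non-spacer) followed by anything
theorem chunk_full (current tail : List (String × String))
    (h1 : ns current = 48) (h3 : lastNS current) :
    chunk (current ++ tail) = current :: chunk tail := by
  have htp : takePage (current ++ tail) 0 = (current, tail) :=
    takePage_cut current tail 0 (by omega) h3
  have hne : current ≠ [] := by
    intro he; subst he; exact absurd h3 (by simp [lastNS])
  cases hc : current ++ tail with
  | nil => simp at hne; exact absurd (List.append_eq_nil_iff.mp hc).1 hne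
  | cons x r =>
    rw [chunk, ← hc, htp]

-- accumulator lemma for splitSegs
theorem splitSegs_acc : ∀ (rest : List (String × String)) (a b : List (List (String × String))) (seg : List (String × String)),
    splitSegs rest (a ++ b) seg = (a ++ (splitSegs rest b seg).1, (splitSegs rest b seg).2) := by
  intro rest
  induction rest with
  | nil => intro a b seg; simp [splitSegs]
  | cons x r ih =>
    intro a b seg
    obtain ⟨t, k⟩ := x
    simp only [splitSegs]
    split
    · rw [List.append_assoc, ih]
    · rw [ih]

-- prepending pagebreak-free lines goes into the seg accumulator
theorem splitSegs_prepend : ∀ (c : List (String × String)),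
    (∀ p ∈ c, p.2 ≠ "pagebreak") →
    ∀ (lines : List (String × String)) (segs : List (List (String × String))) (seg : List (String × String)),
    splitSegs (c ++ lines) segs seg = splitSegs lines segs (seg ++ c) := by
  intro c
  induction c with
  | nil => intro _ lines segs seg; simp
  | cons x r ih =>
    intro hpb lines segs seg
    obtain ⟨t, k⟩ := x
    have hk : k ≠ "pagebreak" := hpb (t, k) (by simp)
    simp only [List.cons_append, splitSegs, if_neg hk]
    rw [ih (fun p hp => hpb p (by simp [hp])) lines segs (seg ++ [(t, k)])]
    simp

-- the seg accumulator is a prefix of the first produced segment (or of the trailing seg)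
theorem splitSegs_seg_prefix : ∀ (rest s : List (String × String)),
    ((splitSegs rest [] s).1 = [] → s <+: (splitSegs rest [] s).2) ∧
    (∀ h0 tt, (splitSegs rest [] s).1 = h0 :: tt → s <+: h0) := by
  intro rest
  induction rest with
  | nil =>
    intro s
    refine ⟨fun _ => ?_, fun h0 tt h1 => ?_⟩
    · simp [splitSegs]
    · simp [splitSegs] at h1
  | cons x r ih =>
    intro s
    obtain ⟨t, k⟩ := x
    simp only [splitSegs]
    split
    · simp only [List.nil_append]
      have hacc := splitSegs_acc r [s] [] []
      simp only [List.append_nil] at hacc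
      refine ⟨fun h1 => ?_, fun h0 tt h1 => ?_⟩
      · rw [hacc] at h1; simp at h1
      · rw [hacc] at h1
        simp only [List.singleton_append, List.cons.injEq] at h1
        rw [h1.1]
    · have hpre : s <+: s ++ [(t, k)] := ⟨[(t, k)], rfl⟩
      refine ⟨fun h1 => ?_, fun h0 tt h1 => ?_⟩
      · exact hpre.trans ((ih (s ++ [(t, k)])).1 h1)
      · exact hpre.trans ((ih (s ++ [(t, k)])).2 h0 tt h1)

-- moving a pagebreak-free block into the seg accumulator, relative to the plain run
theorem splitSegs_seg_shift : ∀ (rest c s : List (String × String)),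
    splitSegs rest [] (c ++ s) =
      (match splitSegs rest [] s with
       | ([], l) => ([], c ++ l)
       | (h :: tt, l) => ((c ++ h) :: tt, l)) := by
  intro rest
  induction rest with
  | nil => intro c s; simp [splitSegs]
  | cons x r ih =>
    intro c s
    obtain ⟨t, k⟩ := x
    simp only [splitSegs]
    split
    · simp only [List.nil_append]
      have hacc1 := splitSegs_acc r [c ++ s] [] []
      have hacc2 := splitSegs_acc r [s] [] []
      simp only [List.append_nil] at hacc1 hacc2
      rw [hacc1, hacc2]
      simp
    · rw [show c ++ s ++ [(t, k)] = c ++ (s ++ [(t, k)]) by simp, ih c (s ++ [(t, k)])]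

-- chunk of a nonempty segment is nonempty
theorem chunk_ne (seg : List (String × String)) (h : seg ≠ []) : chunk seg ≠ [] := by
  cases seg with
  | nil => exact absurd rfl h
  | cons x r => rw [chunk]; simp

-- P1: a pagebreak after a valid partial page emits exactly that page
theorem alt_pagebreak (current : List (String × String)) (count : Nat) (t : String)
    (hi : PageInv current count) (hpb : ∀ p ∈ current, p.2 ≠ "pagebreak") (rest : List (String × String)) :
    paginate_lines_alt (current ++ (t, "pagebreak") :: rest) = current :: paginate_lines_alt rest := by
  unfold paginate_lines_alt
  rw [splitSegs_prepend current hpb ((t, "pagebreak") :: rest) [] []]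
  simp only [List.nil_append, splitSegs, reduceIte]
  have hacc := splitSegs_acc rest [current] [] []
  simp only [List.append_nil] at hacc
  rw [hacc]
  simp only [List.flatMap_append, List.flatMap_cons, List.flatMap_nil, List.append_nil,
    List.append_assoc]
  by_cases hc : current = []
  · subst hc; simp [chunk]
  · rw [chunk_inv current count hi hc, if_neg (by simp)]
    simp

-- P2: a full page followed by a non-pagebreak line splits off exactly
theorem alt_full (current : List (String × String)) (t k : String)
    (h1 : ns current = 48) (h3 : lastNS current)
    (hpb : ∀ p ∈ current, p.2 ≠ "pagebreak") (hk : k ≠ "pagebreak") (rest : List (String × String)) :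
    paginate_lines_alt (current ++ (t, k) :: rest) = current :: paginate_lines_alt ((t, k) :: rest) := by
  have hcne : current ≠ [] := by
    intro he; subst he; exact absurd h3 (by simp [lastNS])
  unfold paginate_lines_alt
  rw [splitSegs_prepend current hpb ((t, k) :: rest) [] []]
  simp only [List.nil_append, splitSegs, if_neg hk]
  have hshift := splitSegs_seg_shift rest current [(t, k)]
  rw [hshift]
  cases hsp : splitSegs rest [] [(t, k)] with
  | mk ss l =>
    have hpre := splitSegs_seg_prefix rest [(t, k)]
    rw [hsp] at hpre
    cases ss with
    | nil =>
      have hl2 : [(t, k)] <+: l := hpre.1 rfl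
      have hlne : l ≠ [] := by
        intro he; subst he
        simp at hl2
      simp only [List.flatMap_nil, List.nil_append]
      rw [if_pos (show current ++ l ≠ [] by simp [hcne]), if_pos hlne,
          chunk_full current l h1 h3]
    | cons h0 tt =>
      have h0ne : h0 ≠ [] := by
        intro he
        have := hpre.2 h0 tt rfl
        subst he
        simpa using List.prefix_nil.mp this
      simp only [List.flatMap_cons, List.append_assoc]
      rw [chunk_full current h0 h1 h3]
      rw [if_neg (show ¬ (current :: chunk h0 = []) by simp), if_neg (chunk_ne h0 h0ne)]
      simp

-- B on a pagebreak-free partial page alone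
theorem alt_base (current : List (String × String)) (count : Nat)
    (hi : PageInv current count) (hpb : ∀ p ∈ current, p.2 ≠ "pagebreak") :
    paginate_lines_alt current = if current ≠ [] then [current] else [] := by
  unfold paginate_lines_alt
  rw [show current = current ++ [] by simp, splitSegs_prepend current hpb [] [] []]
  simp only [splitSegs, List.nil_append, List.append_nil, List.flatMap_nil]
  by_cases hc : current = []
  · subst hc; simp
  · rw [if_pos hc, if_pos hc, chunk_inv current count hi hc]

theorem lastNS_append_single : ∀ (l : List (String × String)) (t k : String),
    lastNS (l ++ [(t, k)]) ↔ k ≠ "spacer" := by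
  intro l
  induction l with
  | nil => intro t k; simp [lastNS]
  | cons x r ih =>
    intro t k
    cases r with
    | nil => simpa [lastNS] using ih t k
    | cons y rr =>
      simp only [List.cons_append] at ih ⊢
      rw [lastNS_cons_cons]
      exact ih t k

theorem ns_append_single (l : List (String × String)) (t k : String) :
    ns (l ++ [(t, k)]) = ns l + (if k ≠ "spacer" then 1 else 0) := by
  induction l with
  | nil => simp [ns]
  | cons x r ih =>
    obtain ⟨t', k'⟩ := x
    simp only [List.cons_append, ns, ih]
    omega

-- MAIN: A's loop, started in any valid state, computes B's result of the remaining input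
theorem pagLoop_eq : ∀ (lines : List (String × String)) (pages : List (List (String × String)))
    (current : List (String × String)) (count : Nat),
    PageInv current count → (∀ p ∈ current, p.2 ≠ "pagebreak") →
    pagLoop lines pages current count = pages ++ paginate_lines_alt (current ++ lines) := by
  intro lines
  induction lines with
  | nil =>
    intro pages current count hi hpb
    simp only [pagLoop, List.append_nil]
    rw [alt_base current count hi hpb]
    split <;> simp
  | cons x rest ih =>
    intro pages current count hi hpb
    obtain ⟨t, k⟩ := x
    simp only [pagLoop]
    by_cases hk : k = "pagebreak"
    · subst hk
      rw [if_pos rfl]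
      rw [ih (pages ++ [current]) [] 0 ⟨by simp [ns], by omega, by omega⟩ (by simp)]
      simp only [List.nil_append]
      rw [alt_pagebreak current count t hi hpb rest]
      simp
    · rw [if_neg hk]
      by_cases h48 : 48 ≤ count
      · rw [if_pos h48]
        obtain ⟨h1, h2, h3⟩ := hi
        have hc48 : count = 48 := by omega
        rw [ih (pages ++ [current]) [(t, k)] (if k ≠ "spacer" then 1 else 0)
              ⟨by simp [ns], by split <;> omega, by split <;> omega⟩
              (by simp [hk])]
        simp only [List.singleton_append]
        rw [alt_full current t k (by omega) (h3 hc48) hpb hk rest]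
        simp
      · rw [if_neg h48]
        obtain ⟨h1, h2, h3⟩ := hi
        have hinv' : PageInv (current ++ [(t, k)]) (count + if k ≠ "spacer" then 1 else 0) := by
          refine ⟨?_, ?_, ?_⟩
          · rw [ns_append_single, h1]
          · split <;> omega
          · intro h48'
            rw [lastNS_append_single]
            intro hsp
            simp only [hsp] at h48'
            simp at h48'
            omega
        rw [ih pages (current ++ [(t, k)]) _ hinv'
              (by intro p hp
                  rcases List.mem_append.mp hp with h | h
                  · exact hpb p h
                  · simp at h; subst h; exact hk)]
        simp

-- ===== VERDICT (by name: the statement is the Claim_ definition above) =====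
theorem paginate_lines_spec : Claim_equal_paginate_lines := by
  intro lines _
  unfold Spec_paginate_lines paginate_lines
  rw [pagLoop_eq lines [] [] 0 ⟨by simp [ns], by omega, by omega⟩ (by simp)]
  simp
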